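-- pv_equiv track=rewrite | github.com/molokwuvictor/Main_Library | DNN_models_Dec2023.py | sparse_pad_list
-- ===== SOURCE A (Python) =====
-- def sparse_pad_list(depth=None,nstacks=None):
--     if nstacks>depth:
--         nstacks=depth
--     elif nstacks==0:
--         nstacks=1
--     no_per_stack=int(depth/nstacks)
--     rem_stack=int(depth%nstacks)
--     new_list=[]
--     for i in range(int(nstacks)):
--         if i==0:
--             stack=[no_per_stack+rem_stack]+(no_per_stack+rem_stack-1)*[0]
--         else:
--             stack=[no_per_stack]+(no_per_stack-1)*[0]
--         new_list=new_list+stack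
--     return new_list
-- ===== SOURCE B (Python) =====
-- def sparse_pad_list(depth=None, nstacks=None):
--     # scatter counts into a preallocated zero array instead of concatenating per-stack sublists
--     if nstacks > depth:
--         nstacks = depth
--     elif nstacks == 0:
--         nstacks = 1
--     if nstacks <= 0:
--         return []
--     no_per_stack = int(depth / nstacks)
--     rem_stack = int(depth % nstacks)
--     result = [0] * max(depth, 1)
--     result[0] = no_per_stack + rem_stack
--     pos = no_per_stack + rem_stack
--     for i in range(1, nstacks):
--         result[pos] = no_per_stack
--         pos += no_per_stack
--     return result
-- ===== Notes on version B (the rewrite author's own statement) =====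
-- stated objective: faster
-- what changed: B preallocates a zero list of length depth and scatters each stack's leading count into it at its computed offset, instead of building per-stack sublists and repeatedly concatenating them with new_list=new_list+stack.
-- crash fix: On depth == 0 with nstacks > 0 A raises ZeroDivisionError (nstacks is clamped to depth == 0); B returns the empty list. — e.g. on sparse_pad_list(0, 3): A raises ZeroDivisionError, B returns []
import Mathlib
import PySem

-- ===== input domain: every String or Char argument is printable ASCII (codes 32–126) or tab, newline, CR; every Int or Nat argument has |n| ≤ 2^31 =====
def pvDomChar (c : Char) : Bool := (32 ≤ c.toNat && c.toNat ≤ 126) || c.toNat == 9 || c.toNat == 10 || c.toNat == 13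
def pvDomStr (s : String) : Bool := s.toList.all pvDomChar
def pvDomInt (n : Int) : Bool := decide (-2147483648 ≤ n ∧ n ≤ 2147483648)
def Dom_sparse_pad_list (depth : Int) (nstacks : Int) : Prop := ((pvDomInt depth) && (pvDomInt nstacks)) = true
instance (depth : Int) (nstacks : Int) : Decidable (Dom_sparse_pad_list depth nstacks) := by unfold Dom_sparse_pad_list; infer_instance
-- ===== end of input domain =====

-- B scatters the counts into a preallocated zero list instead of concatenating per-stack sublists (simpler single write per stack, no repeated list concatenation).

-- ===== PORT A =====
def sparse_pad_list (depth : Int) (nstacks : Int) : List Int :=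
  let ns := if nstacks > depth then depth else if nstacks = 0 then 1 else nstacks
  let no_per_stack := PySem.Int.truncdiv depth ns          -- int(depth/ns), exact on |·| ≤ 2^31
  let rem_stack := PySem.Int.mod depth ns                  -- depth % ns (Python mod; ns = 0 excluded by Pre_)
  (PySem.List.pyRange 0 ns 1).foldl
    (fun new_list i =>
      new_list ++ (if i = 0
        then (no_per_stack + rem_stack) :: List.replicate (no_per_stack + rem_stack - 1).toNat (0:Int)
        else no_per_stack :: List.replicate (no_per_stack - 1).toNat (0:Int)))
    []

-- ===== PORT B =====
def sparse_pad_list_alt (depth : Int) (nstacks : Int) : List Int :=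
  let ns := if nstacks > depth then depth else if nstacks = 0 then 1 else nstacks
  if ns ≤ 0 then []
  else
    let no_per_stack := PySem.Int.truncdiv depth ns
    let rem_stack := PySem.Int.mod depth ns
    let res0 := (List.replicate (max depth 1).toNat (0:Int)).set 0 (no_per_stack + rem_stack)
    ((PySem.List.pyRange 1 ns 1).foldl
      (fun (st : List Int × Int) _ => (st.1.set st.2.toNat no_per_stack, st.2 + no_per_stack))
      (res0, no_per_stack + rem_stack)).1

-- ===== PRECONDITION & SPEC =====
-- Pre_ excludes exactly the inputs (depth = 0 with nstacks > 0) on which A raises ZeroDivisionError.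
def Pre_sparse_pad_list (depth : Int) (nstacks : Int) : Prop := ¬ (depth = 0 ∧ 0 < nstacks)
instance (depth : Int) (nstacks : Int) : Decidable (Pre_sparse_pad_list depth nstacks) := by unfold Pre_sparse_pad_list; infer_instance
def pvWitness_sparse_pad_list : Int × Int := (7, 3)

-- On depth = 0 with nstacks > 0, A raises ZeroDivisionError; B returns the empty list.
def Raises_sparse_pad_list (depth : Int) (nstacks : Int) : Prop := depth = 0 ∧ 0 < nstacks
instance (depth : Int) (nstacks : Int) : Decidable (Raises_sparse_pad_list depth nstacks) := by unfold Raises_sparse_pad_list; infer_instance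
def pvRaiseWitness_sparse_pad_list : Int × Int := (0, 3)
def pvRaiseWitnessOut_sparse_pad_list : List Int := []

def Spec_sparse_pad_list (depth : Int) (nstacks : Int) (out : List Int) : Prop := out = sparse_pad_list_alt depth nstacks
instance (depth : Int) (nstacks : Int) (out : List Int) : Decidable (Spec_sparse_pad_list depth nstacks out) := by unfold Spec_sparse_pad_list; infer_instance

-- ===== CLAIM (what is proved, stated in full; the proofs are below) =====
def Claim_equal_sparse_pad_list : Prop := ∀ (depth : Int) (nstacks : Int), Dom_sparse_pad_list depth nstacks → Pre_sparse_pad_list depth nstacks → Spec_sparse_pad_list depth nstacks (sparse_pad_list depth nstacks)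
def Claim_raises_sparse_pad_list : Prop := (∀ (depth : Int) (nstacks : Int), Dom_sparse_pad_list depth nstacks → Raises_sparse_pad_list depth nstacks → ¬ Pre_sparse_pad_list depth nstacks) ∧ (Dom_sparse_pad_list (pvRaiseWitness_sparse_pad_list.1) (pvRaiseWitness_sparse_pad_list.2) ∧ Raises_sparse_pad_list (pvRaiseWitness_sparse_pad_list.1) (pvRaiseWitness_sparse_pad_list.2) ∧ sparse_pad_list_alt (pvRaiseWitness_sparse_pad_list.1) (pvRaiseWitness_sparse_pad_list.2) = pvRaiseWitnessOut_sparse_pad_list)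

-- ===== LEMMAS AND PROOFS =====

def pvZeros (m : Nat) : List Int := List.replicate m 0
def pvTail (nn : Nat) : List Int := (nn:Int) :: pvZeros (nn-1)
def pvHead (nn rr : Nat) : List Int := ((nn+rr : Nat):Int) :: pvZeros (nn+rr-1)
def pvStep (nn : Nat) : List Int × Int → List Int × Int :=
  fun st => (st.1.set st.2.toNat (nn:Int), st.2 + (nn:Int))

lemma pv_foldl_iterate {α β : Type} (f : β → β) :
    ∀ (l : List α) (init : β), l.foldl (fun st _ => f st) init = f^[l.length] init := by
  intro l
  induction l with
  | nil => intro init; simp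
  | cons a l ih =>
      intro init
      simp only [List.foldl_cons, List.length_cons, Function.iterate_succ_apply]
      exact ih (f init)

lemma pv_A_fold (h t : List Int) :
    ∀ (m : Nat) (a b : Int), 1 ≤ a → (b - a).toNat = m → ∀ acc : List Int,
      (PySem.List.pyRange a b 1).foldl
        (fun acc i => acc ++ (if i = 0 then h else t)) acc
      = acc ++ (List.replicate m t).flatten := by
  intro m
  induction m with
  | zero =>
      intro a b ha hm acc
      rw [PySem.List.pyRange_one_eq_nil (by omega)]
      simp
  | succ m ih =>
      intro a b ha hm acc
      rw [PySem.List.pyRange_one_cons (by omega)]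
      simp only [List.foldl_cons]
      rw [if_neg (by omega)]
      rw [ih (a+1) b (by omega) (by omega) (acc ++ t)]
      simp [List.replicate_succ, List.append_assoc]

lemma pv_scatter_iter (nn rr : Nat) (hn : 1 ≤ nn) (K : Nat) :
    ∀ k : Nat, k ≤ K →
      (pvStep nn)^[k] (pvHead nn rr ++ pvZeros (K*nn), ((nn+rr : Nat):Int))
      = (pvHead nn rr ++ (List.replicate k (pvTail nn)).flatten ++ pvZeros ((K-k)*nn),
         ((nn+rr+k*nn : Nat):Int)) := by
  intro k
  induction k with
  | zero => intro _; simp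
  | succ k ih =>
      intro hk
      have hk' : k ≤ K := by omega
      rw [Function.iterate_succ_apply', ih hk']
      have hlenH : (pvHead nn rr).length = nn + rr := by
        simp [pvHead, pvZeros]; omega
      have hlenT : (pvTail nn).length = nn := by
        simp [pvTail, pvZeros]; omega
      have hlenF : ((List.replicate k (pvTail nn)).flatten).length = k * nn := by
        simp [List.length_flatten, List.map_replicate, hlenT, List.sum_replicate, mul_comm]
      have hKk : K - k = 1 + (K - (k+1)) := by omega
      have hz : pvZeros ((K-k)*nn)
          = (0:Int) :: (pvZeros (nn-1) ++ pvZeros ((K-(k+1))*nn)) := by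
        have e1 : (K - k) * nn = nn + (K - (k+1)) * nn := by
          rw [hKk, Nat.add_mul, Nat.one_mul]
        have e2 : nn = 1 + (nn - 1) := by omega
        have e3 : (K - k) * nn = 1 + ((nn-1) + (K - (k+1)) * nn) := by omega
        rw [pvZeros, e3, List.replicate_add, List.replicate_one, List.replicate_add]
        rfl
      simp only [pvStep, Prod.mk.injEq]
      refine ⟨?_, ?_⟩
      · -- list component
        rw [hz]
        rw [show pvHead nn rr ++ (List.replicate k (pvTail nn)).flatten
              ++ ((0:Int) :: (pvZeros (nn-1) ++ pvZeros ((K-(k+1))*nn)))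
            = (pvHead nn rr ++ (List.replicate k (pvTail nn)).flatten)
              ++ ((0:Int) :: (pvZeros (nn-1) ++ pvZeros ((K-(k+1))*nn))) by
          simp [List.append_assoc]]
        rw [List.set_append]
        have hlen : (pvHead nn rr ++ (List.replicate k (pvTail nn)).flatten).length
            = nn + rr + k*nn := by simp [hlenH, hlenF]
        have hidx : ((nn + rr + k * nn : Nat) : Int).toNat = nn + rr + k*nn := by omega
        rw [hidx, hlen, if_neg (by omega), Nat.sub_self, List.set_cons_zero]
        have : (nn:Int) :: (pvZeros (nn-1) ++ pvZeros ((K-(k+1))*nn))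
            = pvTail nn ++ pvZeros ((K-(k+1))*nn) := by simp [pvTail]
        rw [this]
        rw [List.replicate_succ' (n := k)]
        simp [List.append_assoc]
      · -- position component
        push_cast
        ring

lemma pv_main (depth ns : Int) (h1 : 0 < ns) (h2 : ns ≤ depth) :
    (PySem.List.pyRange 0 ns 1).foldl
      (fun new_list i =>
        new_list ++ (if i = 0
          then (PySem.Int.truncdiv depth ns + PySem.Int.mod depth ns) :: List.replicate (PySem.Int.truncdiv depth ns + PySem.Int.mod depth ns - 1).toNat (0:Int)
          else PySem.Int.truncdiv depth ns :: List.replicate (PySem.Int.truncdiv depth ns - 1).toNat (0:Int)))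
      []
    = ((PySem.List.pyRange 1 ns 1).foldl
        (fun (st : List Int × Int) _ => (st.1.set st.2.toNat (PySem.Int.truncdiv depth ns), st.2 + PySem.Int.truncdiv depth ns))
        ((List.replicate (max depth 1).toNat (0:Int)).set 0 (PySem.Int.truncdiv depth ns + PySem.Int.mod depth ns), PySem.Int.truncdiv depth ns + PySem.Int.mod depth ns)).1 := by
  have hdp : (0:Int) < depth := lt_of_lt_of_le h1 h2
  have hnd : PySem.Int.truncdiv depth ns = depth / ns := by
    unfold PySem.Int.truncdiv
    exact Int.tdiv_eq_ediv_of_nonneg (by omega)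
  have hmd : PySem.Int.mod depth ns = depth % ns := PySem.Int.mod_eq_emod_of_pos h1
  set n := PySem.Int.truncdiv depth ns with hn
  set r := PySem.Int.mod depth ns with hr
  have hn1 : 1 ≤ n := by
    rw [hnd]; rw [Int.le_ediv_iff_mul_le h1]; omega
  have hr0 : 0 ≤ r := by rw [hmd]; exact Int.emod_nonneg depth (by omega)
  have hrlt : r < ns := by rw [hmd]; exact Int.emod_lt_of_pos depth h1
  have heq : ns * n + r = depth := by rw [hnd, hmd]; exact Int.mul_ediv_add_emod depth ns
  -- pass to Nat data
  set nn := n.toNat with hnn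
  set rr := r.toNat with hrr
  set N := ns.toNat with hN
  have hcn : (nn:Int) = n := Int.toNat_of_nonneg (by omega)
  have hcr : (rr:Int) = r := Int.toNat_of_nonneg hr0
  have hcN : (N:Int) = ns := Int.toNat_of_nonneg (by omega)
  have hnn1 : 1 ≤ nn := by omega
  have hN1 : 1 ≤ N := by omega
  have hD : depth.toNat = N*nn + rr := by
    have : (N:Int) * (nn:Int) + (rr:Int) = depth := by rw [hcn, hcr, hcN]; exact heq
    have h' : ((N*nn + rr : Nat) : Int) = depth := by push_cast; linarith [this]
    omega
  -- LHS
  rw [PySem.List.pyRange_one_cons h1]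
  simp only [List.foldl_cons, List.nil_append, if_true, zero_add]
  rw [pv_A_fold _ _ ((ns-1).toNat) 1 ns (le_refl 1) rfl]
  -- identify head and tail with pvHead / pvTail
  have hhead : (n + r) :: List.replicate (n + r - 1).toNat (0:Int) = pvHead nn rr := by
    have e1 : n + r = ((nn + rr : Nat) : Int) := by push_cast; omega
    have e2 : (n + r - 1).toNat = nn + rr - 1 := by omega
    rw [e2, e1]; rfl
  have htail : n :: List.replicate (n - 1).toNat (0:Int) = pvTail nn := by
    have e2 : (n - 1).toNat = nn - 1 := by omega
    rw [e2, ← hcn]; rfl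
  rw [hhead, htail]
  -- RHS
  have hiter : (ns - 1).toNat = N - 1 := by omega
  have hmax : (max depth 1).toNat = N*nn + rr := by
    rw [show max depth 1 = depth by omega]; exact hD
  have hres0 : (List.replicate (max depth 1).toNat (0:Int)).set 0 (n + r)
      = pvHead nn rr ++ pvZeros ((N-1)*nn) := by
    rw [hmax]
    have hsplit : N*nn + rr = 1 + ((nn + rr - 1) + (N-1)*nn) := by
      have : N * nn = nn + (N-1)*nn := by
        conv_lhs => rw [show N = 1 + (N-1) by omega]
        rw [Nat.add_mul, Nat.one_mul]
      omega
    rw [hsplit, List.replicate_add, List.replicate_add, List.replicate_one]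
    simp only [List.cons_append, List.set_cons_zero]
    have e1 : n + r = ((nn + rr : Nat) : Int) := by push_cast; omega
    rw [e1]
    simp [pvHead, pvZeros]
  have e1 : n + r = ((nn + rr : Nat) : Int) := by push_cast; omega
  have hscat := pv_scatter_iter nn rr hnn1 (N-1) (N-1) (le_refl _)
  rw [show (fun (st : List Int × Int) (_ : Int) => (st.1.set st.2.toNat n, st.2 + n))
        = (fun (st : List Int × Int) (_ : Int) => pvStep nn st) by
    funext st x; rw [pvStep, hcn]]
  rw [pv_foldl_iterate (pvStep nn) (PySem.List.pyRange 1 ns 1)]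
  rw [PySem.List.length_pyRange_one, hiter, hres0, e1, hscat]
  simp [pvZeros]

-- ===== VERDICT (by name: the statement is the Claim_ definition above) =====
theorem sparse_pad_list_spec : Claim_equal_sparse_pad_list := by
  intro depth nstacks _ hpre
  unfold Spec_sparse_pad_list sparse_pad_list sparse_pad_list_alt
  by_cases hgt : nstacks > depth
  · simp only [if_pos hgt]
    rcases lt_trichotomy depth 0 with hd | hd | hd
    · rw [PySem.List.pyRange_one_eq_nil (by omega), if_pos (by omega)]
      simp
    · exact absurd ⟨hd, by omega⟩ hpre
    · rw [if_neg (by omega)]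
      exact pv_main depth depth hd (le_refl _)
  · simp only [if_neg hgt]
    by_cases h0 : nstacks = 0
    · simp only [if_pos h0]
      have hd0 : 0 ≤ depth := by omega
      rcases eq_or_lt_of_le hd0 with hd | hd
      · subst h0; rw [← hd]; decide
      · rw [if_neg (by omega)]
        exact pv_main depth 1 one_pos (by omega)
    · simp only [if_neg h0]
      rcases lt_trichotomy nstacks 0 with hs | hs | hs
      · rw [PySem.List.pyRange_one_eq_nil (by omega), if_pos (by omega)]
        simp
      · exact absurd hs h0
      · rw [if_neg (by omega)]
        exact pv_main depth nstacks hs (by omega)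

@[simp] theorem sparse_pad_list_raises : Claim_raises_sparse_pad_list := by
  unfold Claim_raises_sparse_pad_list
  constructor
  · intro depth nstacks _ hr hp; exact hp hr
  · exact ⟨by decide, by decide, by decide⟩
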